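-- pv_equiv track=rewrite | github.com/aessayeg/ytempire-mvp | infrastructure/database/database_optimizer.py | identify_query_patterns
-- ===== SOURCE A (Python) =====
-- from typing import Dict, List, Optional, Any, Tuple
--
-- def identify_query_patterns(queries: List[Dict]) -> Dict[str, int]:
--     """Identify common patterns in slow queries"""
--     patterns = {
--         "missing_where_clause": 0,
--         "select_star": 0,
--         "large_offset": 0,
--         "no_limit": 0,
--         "complex_joins": 0,
--         "subqueries": 0
--     }
--
--     for query_info in queries:
--         query = query_info.get("query", "").upper()
--
--         if "SELECT *" in query:
--             patterns["select_star"] += 1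
--         if "WHERE" not in query and "SELECT" in query:
--             patterns["missing_where_clause"] += 1
--         if "OFFSET" in query and any(f"OFFSET {n}" in query for n in range(1000, 100000)):
--             patterns["large_offset"] += 1
--         if "SELECT" in query and "LIMIT" not in query:
--             patterns["no_limit"] += 1
--         if query.count("JOIN") > 3:
--             patterns["complex_joins"] += 1
--         if "SELECT" in query and "(" in query and "SELECT" in query[query.index("("):]:
--             patterns["subqueries"] += 1
--
--     return patterns
-- ===== SOURCE B (Python) =====
-- def identify_query_patterns(queries):
--     """Identify common patterns in slow queries."""
--     qs = [query_info.get("query", "").upper() for query_info in queries]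
--
--     def count(pred):
--         return sum(1 for q in qs if pred(q))
--
--     return {
--         "missing_where_clause": count(lambda q: "SELECT" in q and "WHERE" not in q),
--         "select_star": count(lambda q: "SELECT *" in q),
--         "large_offset": count(lambda q: "OFFSET" in q
--                               and any(f"OFFSET {n}" in q for n in range(1000, 100000))),
--         "no_limit": count(lambda q: "SELECT" in q and "LIMIT" not in q),
--         "complex_joins": count(lambda q: q.count("JOIN") > 3),
--         "subqueries": count(lambda q: "SELECT" in q and "(" in q
--                             and "SELECT" in q[q.index("("):]),
--     }
-- ===== Notes on version B (the rewrite author's own statement) =====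
-- stated objective: simpler
-- what changed: Replaces A's single pass that mutates a six-key counter dict per query by one upfront normalization of the query texts followed by six independent per-pattern counts (sum over a predicate), building the result dict directly from those counts; the per-query tests are kept verbatim.
import Mathlib
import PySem

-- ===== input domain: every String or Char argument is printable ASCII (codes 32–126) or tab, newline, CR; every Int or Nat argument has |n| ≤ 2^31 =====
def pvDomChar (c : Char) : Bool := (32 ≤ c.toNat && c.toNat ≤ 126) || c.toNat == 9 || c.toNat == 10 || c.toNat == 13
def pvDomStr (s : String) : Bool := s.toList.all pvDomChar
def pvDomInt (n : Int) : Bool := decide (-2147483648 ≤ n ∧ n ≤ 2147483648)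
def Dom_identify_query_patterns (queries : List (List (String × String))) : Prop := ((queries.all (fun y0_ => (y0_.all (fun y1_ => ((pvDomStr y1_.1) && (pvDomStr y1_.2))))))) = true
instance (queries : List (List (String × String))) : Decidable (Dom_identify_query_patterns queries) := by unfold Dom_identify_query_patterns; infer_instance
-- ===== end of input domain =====

-- B replaces A's single counter-mutating pass over the queries by six independent
-- per-pattern counts over the once-normalized query list (same per-query tests, a
-- plainer decomposition; no speed claim).

-- ===== PORT A =====
-- A: one fold over the queries, mutating a six-key pattern dict.
def identify_query_patterns (queries : List (List (String × String))) : List (String × Int) :=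
  (queries.foldl (fun pats query_info =>
    let query := PySem.Chars.upper ((PySem.Dict.mk query_info).getD "query" "").toList
    let pats := if PySem.Chars.isIn "SELECT *".toList query then
        pats.modify "select_star" 0 (· + 1) else pats
    let pats := if !PySem.Chars.isIn "WHERE".toList query && PySem.Chars.isIn "SELECT".toList query then
        pats.modify "missing_where_clause" 0 (· + 1) else pats
    let pats := if PySem.Chars.isIn "OFFSET".toList query &&
        (PySem.List.pyRange 1000 100000 1).any
          (fun n => PySem.Chars.isIn ("OFFSET ".toList ++ PySem.Int.toChars n) query) then
        pats.modify "large_offset" 0 (· + 1) else pats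
    let pats := if PySem.Chars.isIn "SELECT".toList query && !PySem.Chars.isIn "LIMIT".toList query then
        pats.modify "no_limit" 0 (· + 1) else pats
    let pats := if PySem.Chars.count query "JOIN".toList > 3 then
        pats.modify "complex_joins" 0 (· + 1) else pats
    let pats := if PySem.Chars.isIn "SELECT".toList query && PySem.Chars.isIn "(".toList query &&
        PySem.Chars.isIn "SELECT".toList
          (PySem.List.slice query (some (PySem.Chars.find query "(".toList)) none) then
        pats.modify "subqueries" 0 (· + 1) else pats
    pats)
    (PySem.Dict.mk [("missing_where_clause", (0 : Int)), ("select_star", 0), ("large_offset", 0),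
                    ("no_limit", 0), ("complex_joins", 0), ("subqueries", 0)])).items

-- ===== PORT B =====
-- B: normalize once, then build the result dict from six independent counts.
def identify_query_patterns_alt (queries : List (List (String × String))) : List (String × Int) :=
  let qs := queries.map (fun query_info =>
    PySem.Chars.upper ((PySem.Dict.mk query_info).getD "query" "").toList)
  let count := fun (pred : List Char → Bool) => ((qs.countP pred : Nat) : Int)
  [("missing_where_clause", count (fun q =>
      PySem.Chars.isIn "SELECT".toList q && !PySem.Chars.isIn "WHERE".toList q)),
   ("select_star", count (fun q => PySem.Chars.isIn "SELECT *".toList q)),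
   ("large_offset", count (fun q => PySem.Chars.isIn "OFFSET".toList q &&
      (PySem.List.pyRange 1000 100000 1).any
        (fun n => PySem.Chars.isIn ("OFFSET ".toList ++ PySem.Int.toChars n) q))),
   ("no_limit", count (fun q =>
      PySem.Chars.isIn "SELECT".toList q && !PySem.Chars.isIn "LIMIT".toList q)),
   ("complex_joins", count (fun q => decide (PySem.Chars.count q "JOIN".toList > 3))),
   ("subqueries", count (fun q =>
      PySem.Chars.isIn "SELECT".toList q && PySem.Chars.isIn "(".toList q &&
      PySem.Chars.isIn "SELECT".toList
        (PySem.List.slice q (some (PySem.Chars.find q "(".toList)) none)))]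

-- ===== PRECONDITION & SPEC =====
def Spec_identify_query_patterns (queries : List (List (String × String))) (out : List (String × Int)) : Prop := out = identify_query_patterns_alt queries
instance (queries : List (List (String × String))) (out : List (String × Int)) : Decidable (Spec_identify_query_patterns queries out) := by unfold Spec_identify_query_patterns; infer_instance

-- ===== CLAIM (what is proved, stated in full; the proofs are below) =====
def Claim_equal_identify_query_patterns : Prop := ∀ (queries : List (List (String × String))), Dom_identify_query_patterns queries → Spec_identify_query_patterns queries (identify_query_patterns queries)

-- ===== LEMMAS AND PROOFS =====

-- the normalized (uppercased) query text of one query_info dict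
def pvNorm (query_info : List (String × String)) : List Char :=
  PySem.Chars.upper ((PySem.Dict.mk query_info).getD "query" "").toList

-- the six per-query tests, oriented as in A's source
def pvPss (qi : List (String × String)) : Bool :=
  PySem.Chars.isIn "SELECT *".toList (pvNorm qi)
def pvPmw (qi : List (String × String)) : Bool :=
  !PySem.Chars.isIn "WHERE".toList (pvNorm qi) && PySem.Chars.isIn "SELECT".toList (pvNorm qi)
def pvPlo (qi : List (String × String)) : Bool :=
  PySem.Chars.isIn "OFFSET".toList (pvNorm qi) &&
    (PySem.List.pyRange 1000 100000 1).any
      (fun n => PySem.Chars.isIn ("OFFSET ".toList ++ PySem.Int.toChars n) (pvNorm qi))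
def pvPnl (qi : List (String × String)) : Bool :=
  PySem.Chars.isIn "SELECT".toList (pvNorm qi) && !PySem.Chars.isIn "LIMIT".toList (pvNorm qi)
def pvPcj (qi : List (String × String)) : Bool :=
  decide (PySem.Chars.count (pvNorm qi) "JOIN".toList > 3)
def pvPsq (qi : List (String × String)) : Bool :=
  PySem.Chars.isIn "SELECT".toList (pvNorm qi) && PySem.Chars.isIn "(".toList (pvNorm qi) &&
    PySem.Chars.isIn "SELECT".toList
      (PySem.List.slice (pvNorm qi) (some (PySem.Chars.find (pvNorm qi) "(".toList)) none)

-- the pattern dict with symbolic counts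
def pvD6 (a b c d e f : Int) : PySem.Dict String Int :=
  PySem.Dict.mk [("missing_where_clause", a), ("select_star", b), ("large_offset", c),
                 ("no_limit", d), ("complex_joins", e), ("subqueries", f)]

def pvI (cond : Bool) : Int := if cond then 1 else 0

-- A's fold step, named (the very lambda of the port, so the bridge below is rfl)
def pvStep (pats : PySem.Dict String Int) (query_info : List (String × String)) :
    PySem.Dict String Int :=
    let query := PySem.Chars.upper ((PySem.Dict.mk query_info).getD "query" "").toList
    let pats := if PySem.Chars.isIn "SELECT *".toList query then
        pats.modify "select_star" 0 (· + 1) else pats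
    let pats := if !PySem.Chars.isIn "WHERE".toList query && PySem.Chars.isIn "SELECT".toList query then
        pats.modify "missing_where_clause" 0 (· + 1) else pats
    let pats := if PySem.Chars.isIn "OFFSET".toList query &&
        (PySem.List.pyRange 1000 100000 1).any
          (fun n => PySem.Chars.isIn ("OFFSET ".toList ++ PySem.Int.toChars n) query) then
        pats.modify "large_offset" 0 (· + 1) else pats
    let pats := if PySem.Chars.isIn "SELECT".toList query && !PySem.Chars.isIn "LIMIT".toList query then
        pats.modify "no_limit" 0 (· + 1) else pats
    let pats := if PySem.Chars.count query "JOIN".toList > 3 then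
        pats.modify "complex_joins" 0 (· + 1) else pats
    let pats := if PySem.Chars.isIn "SELECT".toList query && PySem.Chars.isIn "(".toList query &&
        PySem.Chars.isIn "SELECT".toList
          (PySem.List.slice query (some (PySem.Chars.find query "(".toList)) none) then
        pats.modify "subqueries" 0 (· + 1) else pats
    pats

theorem pvA_eq_foldl (queries : List (List (String × String))) :
    identify_query_patterns queries = (queries.foldl pvStep (pvD6 0 0 0 0 0 0)).items := rfl

theorem pvBump_ss (a b c d e f : Int) (cond : Bool) :
    (if cond then (pvD6 a b c d e f).modify "select_star" 0 (· + 1) else pvD6 a b c d e f)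
      = pvD6 a (b + pvI cond) c d e f := by
  cases cond <;> simp [pvD6, pvI, PySem.Dict.modify, PySem.Dict.contains,
    PySem.Dict.insert, PySem.Dict.get?, PySem.Dict.getD]

theorem pvBump_mw (a b c d e f : Int) (cond : Bool) :
    (if cond then (pvD6 a b c d e f).modify "missing_where_clause" 0 (· + 1) else pvD6 a b c d e f)
      = pvD6 (a + pvI cond) b c d e f := by
  cases cond <;> simp [pvD6, pvI, PySem.Dict.modify, PySem.Dict.contains,
    PySem.Dict.insert, PySem.Dict.get?, PySem.Dict.getD]

theorem pvBump_lo (a b c d e f : Int) (cond : Bool) :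
    (if cond then (pvD6 a b c d e f).modify "large_offset" 0 (· + 1) else pvD6 a b c d e f)
      = pvD6 a b (c + pvI cond) d e f := by
  cases cond <;> simp [pvD6, pvI, PySem.Dict.modify, PySem.Dict.contains,
    PySem.Dict.insert, PySem.Dict.get?, PySem.Dict.getD]

theorem pvBump_nl (a b c d e f : Int) (cond : Bool) :
    (if cond then (pvD6 a b c d e f).modify "no_limit" 0 (· + 1) else pvD6 a b c d e f)
      = pvD6 a b c (d + pvI cond) e f := by
  cases cond <;> simp [pvD6, pvI, PySem.Dict.modify, PySem.Dict.contains,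
    PySem.Dict.insert, PySem.Dict.get?, PySem.Dict.getD]

theorem pvBump_cj (a b c d e f : Int) (P : Prop) [Decidable P] :
    (if P then (pvD6 a b c d e f).modify "complex_joins" 0 (· + 1) else pvD6 a b c d e f)
      = pvD6 a b c d (e + pvI (decide P)) f := by
  by_cases h : P <;> simp [h, pvD6, pvI, PySem.Dict.modify, PySem.Dict.contains,
    PySem.Dict.insert, PySem.Dict.get?, PySem.Dict.getD]

theorem pvBump_sq (a b c d e f : Int) (cond : Bool) :
    (if cond then (pvD6 a b c d e f).modify "subqueries" 0 (· + 1) else pvD6 a b c d e f)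
      = pvD6 a b c d e (f + pvI cond) := by
  cases cond <;> simp [pvD6, pvI, PySem.Dict.modify, PySem.Dict.contains,
    PySem.Dict.insert, PySem.Dict.get?, PySem.Dict.getD]

theorem pvStep_eq (a b c d e f : Int) (qi : List (String × String)) :
    pvStep (pvD6 a b c d e f) qi =
      pvD6 (a + pvI (pvPmw qi)) (b + pvI (pvPss qi)) (c + pvI (pvPlo qi))
           (d + pvI (pvPnl qi)) (e + pvI (pvPcj qi)) (f + pvI (pvPsq qi)) := by
  simp only [pvStep]
  rw [pvBump_ss, pvBump_mw, pvBump_lo, pvBump_nl, pvBump_cj, pvBump_sq]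
  simp [pvPss, pvPmw, pvPlo, pvPnl, pvPcj, pvPsq, pvNorm]

theorem pvArith (P : Bool) (a : Int) (c : Nat) :
    a + pvI P + (c : Int) = a + ((c + if P then 1 else 0 : Nat) : Int) := by
  cases P <;> simp [pvI] <;> omega

theorem pvD6_congr {a a' b b' c c' d d' e e' f f' : Int}
    (ha : a = a') (hb : b = b') (hc : c = c') (hd : d = d') (he : e = e') (hf : f = f') :
    pvD6 a b c d e f = pvD6 a' b' c' d' e' f' := by
  subst ha hb hc hd he hf; rfl

theorem pvFoldl_eq (l : List (List (String × String))) :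
    ∀ (a b c d e f : Int),
      l.foldl pvStep (pvD6 a b c d e f) =
        pvD6 (a + (l.countP pvPmw : Int)) (b + (l.countP pvPss : Int)) (c + (l.countP pvPlo : Int))
             (d + (l.countP pvPnl : Int)) (e + (l.countP pvPcj : Int)) (f + (l.countP pvPsq : Int)) := by
  induction l with
  | nil => intro a b c d e f; simp
  | cons x l ih =>
    intro a b c d e f
    rw [List.foldl_cons, pvStep_eq, ih]
    refine pvD6_congr ?_ ?_ ?_ ?_ ?_ ?_ <;>
      (rw [List.countP_cons]; exact pvArith _ _ _)

-- ===== VERDICT (by name: the statement is the Claim_ definition above) =====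
theorem identify_query_patterns_spec : Claim_equal_identify_query_patterns := by
  intro queries _
  unfold Spec_identify_query_patterns
  rw [pvA_eq_foldl, pvFoldl_eq]
  simp only [identify_query_patterns_alt, List.countP_map]
  simp [pvD6]
  refine ⟨?_, ?_, ?_, ?_, ?_, ?_⟩ <;>
    exact List.countP_congr (fun qi _ => by
      simp [pvPss, pvPmw, pvPlo, pvPnl, pvPcj, pvPsq, pvNorm, Bool.and_comm])
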